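-- pv_equiv track=rewrite | github.com/Dykij/openclaw_bot | src/pipeline_utils.py | group_chain
-- ===== SOURCE A (Python) =====
-- def group_chain(chain_list: list[str]) -> list[tuple[str, ...]]:
--     """Groups consecutive Executor_ roles into tuples for parallel dispatch."""
--     groups = []
--     executor_batch = []
--     for role in chain_list:
--         if role.startswith("Executor_"):
--             executor_batch.append(role)
--         else:
--             if executor_batch:
--                 groups.append(tuple(executor_batch))
--                 executor_batch = []
--             groups.append((role,))
--     if executor_batch:
--         groups.append(tuple(executor_batch))
--     return groups
-- ===== SOURCE B (Python) =====
-- def group_chain(chain_list: list[str]) -> list[tuple[str, ...]]: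
--     """Groups consecutive Executor_ roles into tuples for parallel dispatch."""
--     # Stage 1: find the positions of all non-executor roles (the separators).
--     seps = [(i, r) for i, r in enumerate(chain_list) if not r.startswith("Executor_")]
--     # Stage 2: the executor runs are exactly the gaps between consecutive separators.
--     groups = []
--     prev = 0
--     for i, r in seps:
--         if prev < i:
--             groups.append(tuple(chain_list[prev:i]))
--         groups.append((r,))
--         prev = i + 1
--     if prev < len(chain_list):
--         groups.append(tuple(chain_list[prev:]))
--     return groups
-- ===== Notes on version B (the rewrite author's own statement) =====
-- stated objective: alternative
-- what changed: Replaced A's element-by-element pass with a mutable batch buffer by a staged index computation: first enumerate the positions of non-executor separators, then emit each inter-separator gap as one executor tuple by slicing chain_list between consecutive separator indices.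
import Mathlib
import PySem

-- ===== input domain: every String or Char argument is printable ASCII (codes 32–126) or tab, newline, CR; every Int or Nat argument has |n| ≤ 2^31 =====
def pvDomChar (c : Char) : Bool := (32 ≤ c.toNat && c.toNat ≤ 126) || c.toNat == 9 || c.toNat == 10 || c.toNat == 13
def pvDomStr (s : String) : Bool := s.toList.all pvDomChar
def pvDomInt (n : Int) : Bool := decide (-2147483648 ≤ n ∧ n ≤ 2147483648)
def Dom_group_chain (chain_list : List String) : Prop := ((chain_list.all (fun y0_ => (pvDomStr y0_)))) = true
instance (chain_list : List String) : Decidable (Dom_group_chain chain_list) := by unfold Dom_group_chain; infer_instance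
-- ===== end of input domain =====

-- B replaces A's streaming batch-buffer pass by a staged computation: first list the
-- separator (non-executor) positions, then slice out the executor run between consecutive
-- separators; same O(n) cost, a genuinely different decomposition.


-- ===== PORT A =====
-- the loop over chain_list with state (groups, executor_batch), then the final flush
def groupChainLoopA (l : List String) (groups : List (List String)) (batch : List String) : List (List String) :=
  match l with
  | [] => if batch ≠ [] then groups ++ [batch] else groups
  | role :: rest =>
      if PySem.Str.startswith role "Executor_" then
        groupChainLoopA rest groups (batch ++ [role])
      else
        groupChainLoopA rest ((if batch ≠ [] then groups ++ [batch] else groups) ++ [[role]]) []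

def group_chain (chain_list : List String) : List (List String) :=
  groupChainLoopA chain_list [] []

-- ===== PORT B =====
def pvIsExec (r : String) : Bool := PySem.Str.startswith r "Executor_"

-- Stage 1: [(i, r) for i, r in enumerate(chain_list) if not r.startswith("Executor_")]
def pvSeps (chain_list : List String) : List (Int × String) :=
  (PySem.List.enumerate chain_list).filter (fun p => !pvIsExec p.2)

-- Stage 2: the for-loop over seps with state (groups, prev), then the final slice
def groupChainLoopB (l : List String) : List (Int × String) → List (List String) → Int → List (List String)
  | [], groups, prev =>
      if prev < (l.length : Int) then groups ++ [PySem.List.slice l (some prev) none] else groups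
  | (i, r) :: rest, groups, prev =>
      groupChainLoopB l rest
        ((if prev < i then groups ++ [PySem.List.slice l (some prev) (some i)] else groups) ++ [[r]])
        (i + 1)

def group_chain_alt (chain_list : List String) : List (List String) :=
  groupChainLoopB chain_list (pvSeps chain_list) [] 0

-- ===== PRECONDITION & SPEC =====
def Spec_group_chain (chain_list : List String) (out : List (List String)) : Prop := out = group_chain_alt chain_list
instance (chain_list : List String) (out : List (List String)) : Decidable (Spec_group_chain chain_list out) := by unfold Spec_group_chain; infer_instance

-- ===== CLAIM (what is proved, stated in full; the proofs are below) =====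
def Claim_equal_group_chain : Prop := ∀ (chain_list : List String), Dom_group_chain chain_list → Spec_group_chain chain_list (group_chain chain_list)

-- ===== LEMMAS AND PROOFS =====

-- common proof-side specification: the grouping by maximal runs, defined recursively
def specGroups (l : List String) : List (List String) :=
  match l with
  | [] => []
  | x :: xs =>
      let k := pvIsExec x
      let run := x :: xs.takeWhile (fun y => pvIsExec y == k)
      let rest := xs.dropWhile (fun y => pvIsExec y == k)
      if k then run :: specGroups rest
      else run.map (fun r => [r]) ++ specGroups rest
termination_by l.length
decreasing_by
  all_goals
    simpa using Nat.lt_succ_of_le (List.length_dropWhile_le (fun y => pvIsExec y == pvIsExec x) xs)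

theorem loopA_prefix (l : List String) (g : List (List String)) (b : List String) :
    groupChainLoopA l g b = g ++ groupChainLoopA l [] b := by
  induction l generalizing g b with
  | nil => unfold groupChainLoopA; split_ifs <;> simp
  | cons r rest ih =>
      unfold groupChainLoopA
      by_cases hrc : PySem.Str.startswith r "Executor_" = true
      · simp only [hrc, if_true]
        exact ih g (b ++ [r])
      · simp only [hrc, Bool.false_eq_true, if_false]
        rw [ih, ih ((if b ≠ [] then [] ++ [b] else []) ++ [[r]])]
        split_ifs <;> simp

theorem takeWhile_all_append {p : String → Bool} (bs : List String) (r : String) (rest : List String)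
    (hb : ∀ x ∈ bs, p x = true) (hr : p r = false) :
    (bs ++ r :: rest).takeWhile p = bs := by
  induction bs with
  | nil => simp [hr]
  | cons x xs ih =>
      have hx : p x = true := hb x (by simp)
      simp [hx, ih (fun y hy => hb y (by simp [hy]))]

theorem dropWhile_all_append {p : String → Bool} (bs : List String) (r : String) (rest : List String)
    (hb : ∀ x ∈ bs, p x = true) (hr : p r = false) :
    (bs ++ r :: rest).dropWhile p = r :: rest := by
  induction bs with
  | nil => simp [hr]
  | cons x xs ih =>
      have hx : p x = true := hb x (by simp)
      simp [hx, ih (fun y hy => hb y (by simp [hy]))]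

-- splitting off the maximal non-executor run and mapping to singletons is the grouping itself
theorem groups_nonexec_aux (l : List String) :
    (l.takeWhile (fun y => pvIsExec y == false)).map (fun r => [r]) ++
      specGroups (l.dropWhile (fun y => pvIsExec y == false)) = specGroups l := by
  cases l with
  | nil => simp [specGroups]
  | cons y ys =>
      by_cases hy : pvIsExec y = false
      · conv_rhs => rw [specGroups.eq_def]
        simp [hy]
      · simp only [Bool.not_eq_false] at hy
        simp [hy]

-- a non-executor head becomes one singleton group in front of the grouping of the tail
theorem groups_nonexec_cons (r : String) (l : List String) (hr : pvIsExec r = false) :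
    specGroups (r :: l) = [r] :: specGroups l := by
  rw [specGroups.eq_def]
  simp only [hr, Bool.false_eq_true, if_false, List.map_cons, List.cons_append]
  rw [groups_nonexec_aux]

-- a nonempty all-executor list is one group
theorem specGroups_all_exec (bs : List String) (hb : ∀ x ∈ bs, pvIsExec x = true) (hne : bs ≠ []) :
    specGroups bs = [bs] := by
  cases bs with
  | nil => exact absurd rfl hne
  | cons b bs' =>
      have hbt := hb b (by simp)
      have hball : ∀ x ∈ bs', pvIsExec x = true := fun y hy => hb y (by simp [hy])
      have ht : bs'.takeWhile (fun y => pvIsExec y == pvIsExec b) = bs' := by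
        apply List.takeWhile_eq_self_iff.mpr
        intro y hy; simp [hball y hy, hbt]
      have hd : bs'.dropWhile (fun y => pvIsExec y == pvIsExec b) = [] := by
        apply List.dropWhile_eq_nil_iff.mpr
        intro y hy; simp [hball y hy, hbt]
      rw [hbt] at ht hd
      simp only [beq_true] at ht hd
      rw [specGroups.eq_def]
      simp [hbt, ht, hd, specGroups]

-- a nonempty executor run in front of a non-executor role peels off as one group
theorem specGroups_exec_append (bs : List String) (r : String) (rest : List String)
    (hb : ∀ x ∈ bs, pvIsExec x = true) (hne : bs ≠ []) (hr : pvIsExec r = false) :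
    specGroups (bs ++ r :: rest) = bs :: specGroups (r :: rest) := by
  cases bs with
  | nil => exact absurd rfl hne
  | cons b bs' =>
      have hbt := hb b (by simp)
      have hball : ∀ x ∈ bs', pvIsExec x = true := fun y hy => hb y (by simp [hy])
      have ht := takeWhile_all_append (p := fun y => pvIsExec y == pvIsExec b) bs' r rest
        (fun y hy => by simp [hball y hy, hbt]) (by simp [hr, hbt])
      have hd := dropWhile_all_append (p := fun y => pvIsExec y == pvIsExec b) bs' r rest
        (fun y hy => by simp [hball y hy, hbt]) (by simp [hr, hbt])
      rw [hbt] at ht hd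
      rw [specGroups.eq_def]
      simp only [List.cons_append, hbt, if_true, ht, hd]

-- ----- A's loop equals specGroups -----
theorem loopA_eq_groups (l : List String) (batch : List String)
    (hb : ∀ x ∈ batch, pvIsExec x = true) :
    groupChainLoopA l [] batch = specGroups (batch ++ l) := by
  induction l generalizing batch with
  | nil =>
      rw [groupChainLoopA, List.append_nil]
      by_cases hbe : batch = []
      · simp [hbe, specGroups]
      · rw [specGroups_all_exec batch hb hbe]
        simp [hbe]
  | cons r rest ih =>
      rw [groupChainLoopA]
      by_cases hr : PySem.Str.startswith r "Executor_" = true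
      · simp only [hr, if_true]
        rw [ih (batch ++ [r]) (by intro x hx
                                  rcases List.mem_append.mp hx with h | h
                                  · exact hb x h
                                  · simp only [List.mem_singleton] at h; subst h; exact hr)]
        simp
      · simp only [hr, Bool.false_eq_true, if_false]
        rw [loopA_prefix, ih [] (by simp)]
        have hr' : pvIsExec r = false := by simpa [pvIsExec] using hr
        by_cases hbe : batch = []
        · subst hbe
          simp only [List.nil_append]
          rw [groups_nonexec_cons r rest hr']
          simp
        · rw [specGroups_exec_append batch r rest hb hbe hr',
              groups_nonexec_cons r rest hr']
          simp [hbe]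

-- ----- B's staged computation equals specGroups -----

-- the separators of a suffix, with absolute positions
def sepsFrom (k : Nat) (xs : List String) : List (Int × String) :=
  (PySem.List.enumerate xs (k : Int)).filter (fun p => !pvIsExec p.2)

theorem sepsFrom_all_exec (k : Nat) (xs : List String) (hb : ∀ x ∈ xs, pvIsExec x = true) :
    sepsFrom k xs = [] := by
  unfold sepsFrom
  apply List.filter_eq_nil_iff.mpr
  intro p hp
  rcases (PySem.List.mem_enumerate_iff _ _ _).mp hp with ⟨j, hj, rfl⟩
  simp [hb _ (List.getElem_mem hj)]

theorem sepsFrom_split (k : Nat) (bs : List String) (r : String) (rest : List String)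
    (hb : ∀ x ∈ bs, pvIsExec x = true) (hr : pvIsExec r = false) :
    sepsFrom k (bs ++ r :: rest) =
      ((k : Int) + bs.length, r) :: sepsFrom (k + bs.length + 1) rest := by
  unfold sepsFrom
  rw [PySem.List.enumerate_append, List.filter_append]
  have h1 : (PySem.List.enumerate bs (k : Int)).filter (fun p => !pvIsExec p.2) = [] := by
    apply List.filter_eq_nil_iff.mpr
    intro p hp
    rcases (PySem.List.mem_enumerate_iff _ _ _).mp hp with ⟨j, hj, rfl⟩
    simp [hb _ (List.getElem_mem hj)]
  rw [h1, PySem.List.enumerate_cons]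
  simp only [List.nil_append, List.filter_cons, hr]
  norm_num

theorem loopB_prefix (l : List String) (seps : List (Int × String))
    (g : List (List String)) (prev : Int) :
    groupChainLoopB l seps g prev = g ++ groupChainLoopB l seps [] prev := by
  induction seps generalizing g prev with
  | nil => unfold groupChainLoopB; split_ifs <;> simp
  | cons p rest ih =>
      obtain ⟨i, r⟩ := p
      unfold groupChainLoopB
      rw [ih, ih ((if prev < i then [] ++ [PySem.List.slice l (some prev) (some i)] else []) ++ [[r]])]
      split_ifs <;> simp

theorem loopB_main (l : List String) (n : Nat) :
    ∀ (suffix : List String) (prev : Nat), suffix.length ≤ n → l.drop prev = suffix →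
    groupChainLoopB l (sepsFrom prev suffix) [] (prev : Int) = specGroups suffix := by
  induction n with
  | zero =>
      intro suffix prev hlen hdrop
      have hs : suffix = [] := List.eq_nil_of_length_eq_zero (Nat.le_zero.mp hlen)
      subst hs
      rw [sepsFrom_all_exec prev [] (by simp)]
      unfold groupChainLoopB
      have : l.length ≤ prev := List.drop_eq_nil_iff.mp hdrop
      rw [if_neg (by exact_mod_cast Nat.not_lt.mpr this)]
      simp [specGroups]
  | succ m ih =>
      intro suffix prev hlen hdrop
      cases hd : suffix.dropWhile pvIsExec with
      | nil =>
          -- the suffix is all executors (possibly empty): no separators remain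
          have hall : ∀ x ∈ suffix, pvIsExec x = true := by
            intro x hx
            by_contra hfx
            have := List.dropWhile_eq_nil_iff.mp hd x hx
            simp_all
          rw [sepsFrom_all_exec prev suffix hall]
          unfold groupChainLoopB
          by_cases hse : suffix = []
          · subst hse
            have : l.length ≤ prev := List.drop_eq_nil_iff.mp hdrop
            rw [if_neg (by exact_mod_cast Nat.not_lt.mpr this)]
            simp [specGroups]
          · have hlt : prev < l.length := by
              by_contra hge
              exact hse (by rw [← hdrop]; exact List.drop_eq_nil_iff.mpr (Nat.le_of_not_lt hge))
            rw [if_pos (by exact_mod_cast hlt)]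
            rw [PySem.List.slice_from_natCast, hdrop,
                specGroups_all_exec suffix hall hse]
            simp
      | cons r rest =>
          set bs := suffix.takeWhile pvIsExec with hbs
          have hsplit : suffix = bs ++ r :: rest := by
            rw [hbs, ← hd, List.takeWhile_append_dropWhile]
          have hball : ∀ x ∈ bs, pvIsExec x = true := fun x hx => List.mem_takeWhile_imp hx
          have hrne : pvIsExec r = false := by
            have := List.head?_dropWhile_not pvIsExec suffix
            rw [hd] at this
            simpa using this
          rw [hsplit, sepsFrom_split prev bs r rest hball hrne]
          unfold groupChainLoopB
          rw [loopB_prefix]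
          -- the recursive call matches the IH at prev + |bs| + 1 with suffix rest
          have hlenrest : rest.length ≤ m := by
            have : suffix.length = bs.length + (rest.length + 1) := by
              rw [hsplit]; simp
            omega
          have hdroprest : l.drop (prev + bs.length + 1) = rest := by
            have h2 : l.drop prev = bs ++ r :: rest := hsplit ▸ hdrop
            have h3 : l.drop (prev + (bs.length + 1)) = (l.drop prev).drop (bs.length + 1) := by
              rw [List.drop_drop]
            rw [show prev + bs.length + 1 = prev + (bs.length + 1) by ring, h3, h2,
                show bs ++ r :: rest = (bs ++ [r]) ++ rest by simp,
                show bs.length + 1 = (bs ++ [r]).length by simp]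
            exact List.drop_left
          have hcast : (prev : Int) + (bs.length : Int) + 1 = ((prev + bs.length + 1 : Nat) : Int) := by
            push_cast; ring
          rw [hcast, ih rest (prev + bs.length + 1) hlenrest hdroprest]
          -- the emitted executor slice is bs (when nonempty)
          have hslice : PySem.List.slice l (some (prev : Int)) (some ((prev : Int) + (bs.length : Int))) = bs := by
            rw [show (prev : Int) + (bs.length : Int) = ((prev + bs.length : Nat) : Int) by push_cast; ring,
                PySem.List.slice_natCast]
            rw [hdrop, hsplit]
            simp [List.take_left']
          by_cases hbe : bs = []
          · rw [if_neg (by simp [hbe])]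
            simp only [hbe, List.nil_append]
            rw [groups_nonexec_cons r rest hrne]
            simp
          · rw [if_pos (by have : 0 < bs.length := List.length_pos_iff.mpr hbe; omega),
                hslice, specGroups_exec_append bs r rest hball hbe hrne,
                groups_nonexec_cons r rest hrne]
            simp

theorem pvSeps_eq_sepsFrom (l : List String) : pvSeps l = sepsFrom 0 l := by
  simp [pvSeps, sepsFrom]

-- ===== VERDICT (by name: the statement is the Claim_ definition above) =====
theorem group_chain_spec : Claim_equal_group_chain := by
  intro l _
  show group_chain l = group_chain_alt l
  unfold group_chain group_chain_alt
  rw [pvSeps_eq_sepsFrom]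
  rw [loopA_eq_groups l [] (by simp)]
  have := loopB_main l l.length l 0 (by simp) (by simp)
  simpa using this.symm
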